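-- pv_equiv track=rewrite | github.com/raeez/chiral-bar-cobar | compute/lib/virasoro_pbw_bar_motzkin_engine.py | virasoro_pbw_bar_motzkin_table
-- ===== SOURCE A (Python) =====
-- def partitions_up_to(n_max):
--     """Compute partition numbers p(0), p(1), ..., p(n_max) via dynamic programming.
--
--     Uses the standard recurrence: p(n) = number of ways to write n as
--     a sum of positive integers (order irrelevant).
--
--     Returns a list of length n_max + 1.
--
--     Verification:
--       # VERIFIED [DC] dynamic programming recurrence + [LT] OEIS A000041
--     """
--     p = [0] * (n_max + 1)
--     p[0] = 1  # empty partition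
--     for k in range(1, n_max + 1):
--         for j in range(k, n_max + 1):
--             p[j] += p[j - k]
--     return p
--
-- def motzkin_up_to(n_max):
--     """Compute Motzkin numbers M(0), M(1), ..., M(n_max) via the recurrence.
--
--     Recurrence: M(n) = M(n-1) + sum_{k=0}^{n-2} M(k)*M(n-2-k)  for n >= 2.
--     Base cases: M(0) = M(1) = 1.
--
--     The convolution sum is equivalent to the coefficient of x^{n-2} in M(x)^2.
--
--     Returns a list of length n_max + 1.
--
--     Verification:
--       # VERIFIED [DC] recurrence + [LT] OEIS A001006 + [CF] generating function
--     """
--     if n_max < 0: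
--         return []
--     m = [0] * (n_max + 1)
--     m[0] = 1
--     if n_max >= 1:
--         m[1] = 1
--     for n in range(2, n_max + 1):
--         conv = sum(m[k] * m[n - 2 - k] for k in range(n - 1))
--         m[n] = m[n - 1] + conv
--     return m
--
-- def virasoro_bar_cohom_gen_degree(n_max):
--     """Bar cohomology dims in generation degree via P(x) = x * M(x)^2.
--
--     The coefficient of x^n in x * M(x)^2 is:
--       [x^n] x*M(x)^2 = [x^{n-1}] M(x)^2 = sum_{k=0}^{n-1} M(k)*M(n-1-k)
--
--     for n >= 1.
--
--     Returns dict mapping generation degree n -> dim H^*(B(Vir))_n for n = 1..n_max.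
--
--     Verification:
--       # VERIFIED [DC] convolution + [LT] bar_cohomology_wn_universal_engine.py
--     """
--     m = motzkin_up_to(n_max)
--     result = {}
--     for n in range(1, n_max + 1):
--         conv = sum(m[k] * m[n - 1 - k] for k in range(n))
--         result[n] = conv
--     return result
--
-- def virasoro_pbw_bar_motzkin_table(n_max=20):
--     """Full table relating PBW dims, bar cohomology, and Motzkin numbers.
--
--     At each generation degree n = 1, ..., n_max, computes:
--       - pbw_dim:           p(n) = partition number (PBW basis dim at weight n)
--       - bar_cohom:         [x^n] x*M(x)^2 = Motzkin convolution (bar cohom dim)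
--       - motzkin:           M(n) = n-th Motzkin number (Koszul dual dim)
--       - motzkin_increment: M(n) - M(n-1) = bar_cohom(n-1) for n >= 2
--
--     Key identities:
--       (a) bar_cohom(n) = sum_{k=0}^{n-1} M(k)*M(n-1-k)
--       (b) M(n) - M(n-1) = bar_cohom(n-1)  for n >= 2
--
--     Returns a list of dicts.
--
--     Verification:
--       # VERIFIED [DC] all paths independent + [LT] OEIS A000041/A001006
--     """
--     p = partitions_up_to(n_max)
--     m = motzkin_up_to(n_max)
--     bar = virasoro_bar_cohom_gen_degree(n_max)
--
--     table = []
--     for n in range(1, n_max + 1):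
--         motzkin_incr = m[n] - m[n - 1] if n >= 1 else 0
--         row = {
--             'degree': n,
--             'pbw_dim': p[n],
--             'bar_cohom': bar[n],
--             'motzkin': m[n],
--             'motzkin_prev': m[n - 1],
--             'motzkin_increment': motzkin_incr,
--         }
--         table.append(row)
--     return table
-- ===== SOURCE B (Python) =====
-- def virasoro_pbw_bar_motzkin_table(n_max=20):
--     # Motzkin numbers M(0..n_max+1), built by appending; the extra term M(n_max+1)
--     # lets bar_cohom(n) be read off as M(n+1) - M(n) instead of a second convolution pass.
--     m = [1, 1]
--     for n in range(2, n_max + 2):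
--         prefix = m[:n - 1]
--         m.append(m[n - 1] + sum(a * b for a, b in zip(prefix, reversed(prefix))))
--     # Partition numbers by the two-variable recurrence P(n,k) = P(n,k-1) + P(n-k,k)
--     # (partitions of n into parts <= k); p(n) = rows[n][n].
--     rows = [[1] * (n_max + 1)]
--     for n in range(1, n_max + 1):
--         row = [0]
--         for k in range(1, n_max + 1):
--             row.append(row[k - 1] + (rows[n - k][k] if k <= n else 0))
--         rows.append(row)
--     return [
--         {
--             'degree': n,
--             'pbw_dim': rows[n][n],
--             'bar_cohom': m[n + 1] - m[n],
--             'motzkin': m[n],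
--             'motzkin_prev': m[n - 1],
--             'motzkin_increment': m[n] - m[n - 1],
--         }
--         for n in range(1, n_max + 1)
--     ]
-- ===== Notes on version B (the rewrite author's own statement) =====
-- stated objective: alternative
-- what changed: B drops A's entire bar-cohomology convolution pass by reading bar(n) off the Motzkin recurrence as M(n+1)-M(n) (computing one extra Motzkin term by list-appending instead of A's preallocated-array loop), and computes partition numbers by the two-variable recurrence P(n,k)=P(n,k-1)+P(n-k,k) over a 2D table instead of A's in-place part-by-part 1D array sweep.
-- crash fix: On n_max < 0 A raises IndexError (assignment into an empty partition array) while B returns the empty table []. — e.g. on virasoro_pbw_bar_motzkin_table(-1): A raises IndexError, B returns []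
import Mathlib
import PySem

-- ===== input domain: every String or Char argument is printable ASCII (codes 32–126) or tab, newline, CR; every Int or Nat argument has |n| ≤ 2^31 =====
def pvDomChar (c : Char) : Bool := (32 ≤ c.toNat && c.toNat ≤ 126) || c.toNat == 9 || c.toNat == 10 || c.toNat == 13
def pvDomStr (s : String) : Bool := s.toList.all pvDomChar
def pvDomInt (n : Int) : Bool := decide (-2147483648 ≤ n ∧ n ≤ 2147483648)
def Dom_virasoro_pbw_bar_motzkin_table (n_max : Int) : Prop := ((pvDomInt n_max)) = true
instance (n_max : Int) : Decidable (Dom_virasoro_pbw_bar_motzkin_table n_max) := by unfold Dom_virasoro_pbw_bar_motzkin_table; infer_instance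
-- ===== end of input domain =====

-- B replaces A's three quadratic passes by two: the bar-cohomology convolution pass is
-- eliminated via bar(n) = M(n+1) - M(n) (read off the Motzkin recurrence itself), and the
-- partition numbers come from the two-variable recurrence P(n,k)=P(n,k-1)+P(n-k,k)
-- instead of A's in-place part-by-part array sweep.  Objective: alternative algorithm.

-- ===== PORT A =====
-- indexing/assignment inside the loops is always in range (indices come from the loop
-- ranges), so the total forms pyGetD/pySetD with default 0 are exact here.
def partitions_up_to (n_max : Int) : List Int :=
  let p := PySem.List.pySetD (List.replicate (n_max + 1).toNat (0 : Int)) 0 1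
  (PySem.List.pyRange 1 (n_max + 1) 1).foldl (fun p k =>
    (PySem.List.pyRange k (n_max + 1) 1).foldl (fun p j =>
      PySem.List.pySetD p j (PySem.List.pyGetD p j 0 + PySem.List.pyGetD p (j - k) 0)) p) p

def motzkin_up_to (n_max : Int) : List Int :=
  if n_max < 0 then []
  else
    let m := PySem.List.pySetD (List.replicate (n_max + 1).toNat (0 : Int)) 0 1
    let m := if n_max ≥ 1 then PySem.List.pySetD m 1 1 else m
    (PySem.List.pyRange 2 (n_max + 1) 1).foldl (fun m n =>
      let conv := ((PySem.List.pyRange 0 (n - 1) 1).map (fun k =>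
        PySem.List.pyGetD m k 0 * PySem.List.pyGetD m (n - 2 - k) 0)).sum
      PySem.List.pySetD m n (PySem.List.pyGetD m (n - 1) 0 + conv)) m

def virasoro_bar_cohom_gen_degree (n_max : Int) : PySem.Dict Int Int :=
  let m := motzkin_up_to n_max
  (PySem.List.pyRange 1 (n_max + 1) 1).foldl (fun result n =>
    let conv := ((PySem.List.pyRange 0 n 1).map (fun k =>
      PySem.List.pyGetD m k 0 * PySem.List.pyGetD m (n - 1 - k) 0)).sum
    result.insert n conv) PySem.Dict.empty

def virasoro_pbw_bar_motzkin_table (n_max : Int) : List (List (String × Int)) :=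
  let p := partitions_up_to n_max
  let m := motzkin_up_to n_max
  let bar := virasoro_bar_cohom_gen_degree n_max
  (PySem.List.pyRange 1 (n_max + 1) 1).foldl (fun table n =>
    let motzkin_incr := if n ≥ 1 then PySem.List.pyGetD m n 0 - PySem.List.pyGetD m (n - 1) 0 else 0
    let row : List (String × Int) :=
      [("degree", n),
       ("pbw_dim", PySem.List.pyGetD p n 0),
       ("bar_cohom", bar.getD n 0),  -- bar[n]: the key n ∈ {1..n_max} is always present
       ("motzkin", PySem.List.pyGetD m n 0),
       ("motzkin_prev", PySem.List.pyGetD m (n - 1) 0),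
       ("motzkin_increment", motzkin_incr)]
    table ++ [row]) []

-- ===== PORT B =====
def virasoro_pbw_bar_motzkin_table_alt (n_max : Int) : List (List (String × Int)) :=
  let m := (PySem.List.pyRange 2 (n_max + 2) 1).foldl (fun m n =>
    let pref := PySem.List.slice m none (some (n - 1))
    m ++ [PySem.List.pyGetD m (n - 1) 0 +
          ((pref.zip pref.reverse).map (fun ab => ab.1 * ab.2)).sum]) [1, 1]
  let rows := (PySem.List.pyRange 1 (n_max + 1) 1).foldl (fun rows n =>
    let row := (PySem.List.pyRange 1 (n_max + 1) 1).foldl (fun row k =>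
      row ++ [PySem.List.pyGetD row (k - 1) 0 +
              (if k ≤ n then PySem.List.pyGetD (PySem.List.pyGetD rows (n - k) []) k 0 else 0)]) [0]
    rows ++ [row]) [List.replicate (n_max + 1).toNat (1 : Int)]
  (PySem.List.pyRange 1 (n_max + 1) 1).map (fun n =>
    [("degree", n),
     ("pbw_dim", PySem.List.pyGetD (PySem.List.pyGetD rows n []) n 0),
     ("bar_cohom", PySem.List.pyGetD m (n + 1) 0 - PySem.List.pyGetD m n 0),
     ("motzkin", PySem.List.pyGetD m n 0),
     ("motzkin_prev", PySem.List.pyGetD m (n - 1) 0),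
     ("motzkin_increment", PySem.List.pyGetD m n 0 - PySem.List.pyGetD m (n - 1) 0)])

-- ===== PRECONDITION & SPEC =====
-- Pre_ excludes n_max < 0, on which A raises IndexError (assignment into an empty list).
def Pre_virasoro_pbw_bar_motzkin_table (n_max : Int) : Prop := 0 ≤ n_max
instance (n_max : Int) : Decidable (Pre_virasoro_pbw_bar_motzkin_table n_max) := by unfold Pre_virasoro_pbw_bar_motzkin_table; infer_instance
def pvWitness_virasoro_pbw_bar_motzkin_table : Int := 3

-- On n_max < 0 A raises IndexError while B returns the empty table.
def Raises_virasoro_pbw_bar_motzkin_table (n_max : Int) : Prop := n_max < 0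
instance (n_max : Int) : Decidable (Raises_virasoro_pbw_bar_motzkin_table n_max) := by unfold Raises_virasoro_pbw_bar_motzkin_table; infer_instance
def pvRaiseWitness_virasoro_pbw_bar_motzkin_table : Int := -1
def pvRaiseWitnessOut_virasoro_pbw_bar_motzkin_table : List (List (String × Int)) := []

def Spec_virasoro_pbw_bar_motzkin_table (n_max : Int) (out : List (List (String × Int))) : Prop := out = virasoro_pbw_bar_motzkin_table_alt n_max
instance (n_max : Int) (out : List (List (String × Int))) : Decidable (Spec_virasoro_pbw_bar_motzkin_table n_max out) := by unfold Spec_virasoro_pbw_bar_motzkin_table; infer_instance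

-- ===== CLAIM (what is proved, stated in full; the proofs are below) =====
def Claim_equal_virasoro_pbw_bar_motzkin_table : Prop := ∀ (n_max : Int), Dom_virasoro_pbw_bar_motzkin_table n_max → Pre_virasoro_pbw_bar_motzkin_table n_max → Spec_virasoro_pbw_bar_motzkin_table n_max (virasoro_pbw_bar_motzkin_table n_max)
def Claim_raises_virasoro_pbw_bar_motzkin_table : Prop := (∀ (n_max : Int), Dom_virasoro_pbw_bar_motzkin_table n_max → Raises_virasoro_pbw_bar_motzkin_table n_max → ¬ Pre_virasoro_pbw_bar_motzkin_table n_max) ∧ (Dom_virasoro_pbw_bar_motzkin_table (pvRaiseWitness_virasoro_pbw_bar_motzkin_table) ∧ Raises_virasoro_pbw_bar_motzkin_table (pvRaiseWitness_virasoro_pbw_bar_motzkin_table) ∧ virasoro_pbw_bar_motzkin_table_alt (pvRaiseWitness_virasoro_pbw_bar_motzkin_table) = pvRaiseWitnessOut_virasoro_pbw_bar_motzkin_table)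

-- ===== LEMMAS AND PROOFS =====
def Pc : Nat → Nat → Int
  | 0, _ => 1
  | _ + 1, 0 => 0
  | n + 1, k + 1 => Pc (n + 1) k + (if k + 1 ≤ n + 1 then Pc (n - k) (k + 1) else 0)
termination_by n k => (n, k)

def Mz : Nat → Int
  | 0 => 1
  | 1 => 1
  | n + 2 => Mz (n + 1) +
      ((List.range (n + 1)).attach.map (fun k => Mz k.1 * Mz (n - k.1))).sum
decreasing_by
  · omega
  · have := List.mem_range.mp k.2; omega
  · have := List.mem_range.mp k.2; omega

theorem Pc_step (n k : Nat) :
    Pc n (k + 1) = Pc n k + (if k + 1 ≤ n then Pc (n - (k + 1)) (k + 1) else 0) := by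
  cases n with
  | zero => simp [Pc]
  | succ m =>
    rw [Pc]
    congr 1
    have : m + 1 - (k + 1) = m - k := by omega
    rw [this]

theorem Pc_stab (n k : Nat) (h : n ≤ k) : Pc n k = Pc n n := by
  induction k with
  | zero =>
    have : n = 0 := by omega
    subst this; rfl
  | succ m ih =>
    rcases Nat.lt_or_ge n (m + 1) with h1 | h1
    · rw [Pc_step, if_neg (by omega), ih (by omega), add_zero]
    · have : n = m + 1 := by omega
      subst this; rfl

theorem Mz_eq (n : Nat) :
    Mz (n + 2) = Mz (n + 1) + ((List.range (n + 1)).map (fun k => Mz k * Mz (n - k))).sum := by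
  rw [Mz]
  congr 1
  simp only [List.map_subtype, List.unattach_attach]

-- mid-state of A's inner partition loop for part K+1, updated below j0
def pmid (N K j0 : Nat) : List Int :=
  (List.range (N + 1)).map (fun j => if j < j0 then Pc j (K + 1) else Pc j K)

theorem pmid_start (N K : Nat) : pmid N K (K + 1) = (List.range (N + 1)).map (fun j => Pc j K) := by
  unfold pmid
  apply List.map_congr_left
  intro j _
  by_cases h : j < K + 1
  · rw [if_pos h, Pc_step, if_neg (by omega), add_zero]
  · rw [if_neg h]

def istep (K : Nat) (p : List Int) (j : Int) : List Int :=
  PySem.List.pySetD p j (PySem.List.pyGetD p j 0 + PySem.List.pyGetD p (j - ((K:Int) + 1)) 0)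

theorem pmid_step (N K j0 : Nat) (hK : K + 1 ≤ j0) (hj : j0 ≤ N) :
    istep K (pmid N K j0) (j0 : Int) = pmid N K (j0 + 1) := by
  unfold istep
  have hlen : (pmid N K j0).length = N + 1 := by simp [pmid]
  have hcast : (j0 : Int) - ((K:Int) + 1) = ((j0 - (K+1) : Nat) : Int) := by push_cast [Nat.cast_sub hK]; ring
  rw [hcast, PySem.List.pyGetD_natCast, PySem.List.pyGetD_natCast, PySem.List.pySetD_natCast]
  unfold pmid
  rw [PySem.List.getD_map_range _ _ _ _ (by omega), PySem.List.getD_map_range _ _ _ _ (by omega)]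
  rw [if_neg (by omega), if_pos (by omega)]
  apply List.ext_getElem (by simp)
  intro i h1 h2
  simp only [List.getElem_set, List.getElem_map, List.getElem_range]
  by_cases hij : j0 = i
  · subst hij
    rw [if_pos rfl, if_pos (by omega), Pc_step j0 K, if_pos (by omega)]
  · rw [if_neg hij]
    by_cases hlt : i < j0
    · rw [if_pos hlt, if_pos (by omega)]
    · rw [if_neg hlt, if_neg (by omega)]

theorem pinner (N K : Nat) (j0 : Nat) (hj1 : K + 1 ≤ j0) (hj2 : j0 ≤ N + 1) :
    (PySem.List.pyRange (j0 : Int) ((N:Int) + 1) 1).foldl (istep K) (pmid N K j0) = pmid N K (N + 1) := by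
  obtain ⟨d, hd⟩ : ∃ d, j0 + d = N + 1 := ⟨N + 1 - j0, by omega⟩
  induction d generalizing j0 with
  | zero =>
    have h : j0 = N + 1 := by omega
    subst h
    rw [PySem.List.pyRange_one_eq_nil (by omega)]
    rfl
  | succ d ih =>
    rw [PySem.List.pyRange_one_cons (by omega), List.foldl_cons,
      pmid_step N K j0 hj1 (by omega)]
    have : (j0 : Int) + 1 = ((j0 + 1 : Nat) : Int) := by push_cast; ring
    rw [this]
    exact ih (j0 + 1) (by omega) (by omega) (by omega)

theorem Pc_zero (k : Nat) : Pc 0 k = 1 := by rw [Pc]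
theorem Pc_succ_zero (n : Nat) : Pc (n + 1) 0 = 0 := by rw [Pc]

theorem pmid_full (N K : Nat) :
    pmid N K (N + 1) = (List.range (N + 1)).map (fun j => Pc j (K + 1)) := by
  unfold pmid
  apply List.map_congr_left
  intro j hj
  rw [if_pos (by simpa using List.mem_range.mp hj)]

theorem pinit (N : Nat) :
    PySem.List.pySetD (List.replicate (N + 1) (0 : Int)) 0 1
      = (List.range (N + 1)).map (fun j => Pc j 0) := by
  rw [show (0:Int) = ((0:Nat):Int) from rfl, PySem.List.pySetD_natCast]
  apply List.ext_getElem (by simp)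
  intro i h1 h2
  simp only [List.getElem_set, List.getElem_replicate, List.getElem_map, List.getElem_range]
  rcases i with _ | m
  · simp [Pc_zero]
  · simp [Pc_succ_zero]

theorem pouter (N K : Nat) (h : K ≤ N) :
    (PySem.List.pyRange 1 ((K : Int) + 1) 1).foldl (fun p k =>
        (PySem.List.pyRange k ((N : Int) + 1) 1).foldl (fun p j =>
          PySem.List.pySetD p j (PySem.List.pyGetD p j 0 + PySem.List.pyGetD p (j - k) 0)) p)
      ((List.range (N + 1)).map (fun j => Pc j 0))
      = (List.range (N + 1)).map (fun j => Pc j K) := by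
  induction K with
  | zero =>
    rw [PySem.List.pyRange_one_eq_nil (by omega)]
    rfl
  | succ K ih =>
    have hb : ((K + 1 : Nat) : Int) + 1 = ((K : Int) + 1) + 1 := by push_cast; ring
    rw [hb, PySem.List.pyRange_one_succ_right (by omega), List.foldl_append, ih (by omega)]
    show (PySem.List.pyRange ((K : Int) + 1) ((N : Int) + 1) 1).foldl (istep K)
        ((List.range (N + 1)).map (fun j => Pc j K)) = _
    rw [← pmid_start]
    have hc : (K : Int) + 1 = ((K + 1 : Nat) : Int) := by push_cast; ring
    rw [hc, pinner N K (K + 1) (by omega) (by omega), pmid_full]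

theorem partA (N : Nat) :
    partitions_up_to (N : Int) = (List.range (N + 1)).map (fun j => Pc j N) := by
  unfold partitions_up_to
  have ht : ((N : Int) + 1).toNat = N + 1 := by omega
  rw [ht, pinit]
  exact pouter N N le_rfl

def mmid (N t : Nat) : List Int :=
  (List.range (N + 1)).map (fun i => if i < t then Mz i else 0)

def mstepf (m : List Int) (n : Int) : List Int :=
  let conv := ((PySem.List.pyRange 0 (n - 1) 1).map (fun k =>
    PySem.List.pyGetD m k 0 * PySem.List.pyGetD m (n - 2 - k) 0)).sum
  PySem.List.pySetD m n (PySem.List.pyGetD m (n - 1) 0 + conv)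

theorem mstep (N t : Nat) (h2 : 2 ≤ t) (ht : t ≤ N) :
    mstepf (mmid N t) (t : Int) = mmid N (t + 1) := by
  unfold mstepf
  have hr : (t : Int) - 1 = ((t - 1 : Nat) : Int) := by omega
  have hconv : ((PySem.List.pyRange 0 ((t : Int) - 1) 1).map (fun k =>
      PySem.List.pyGetD (mmid N t) k 0 * PySem.List.pyGetD (mmid N t) ((t : Int) - 2 - k) 0)).sum
      = ((List.range (t - 1)).map (fun k => Mz k * Mz (t - 2 - k))).sum := by
    rw [hr, PySem.List.pyRange_zero_nat]
    rw [List.map_map]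
    congr 1
    apply List.map_congr_left
    intro k hk
    have hk' : k < t - 1 := List.mem_range.mp hk
    have hc2 : (t : Int) - 2 - (k : Int) = ((t - 2 - k : Nat) : Int) := by omega
    simp only [Function.comp]
    rw [hc2, PySem.List.pyGetD_natCast, PySem.List.pyGetD_natCast]
    unfold mmid
    rw [PySem.List.getD_map_range _ _ _ _ (by omega), PySem.List.getD_map_range _ _ _ _ (by omega)]
    rw [if_pos (by omega), if_pos (by omega)]
  rw [hconv, hr, PySem.List.pyGetD_natCast, PySem.List.pySetD_natCast]
  unfold mmid
  rw [PySem.List.getD_map_range _ _ _ _ (by omega), if_pos (by omega)]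
  apply List.ext_getElem (by simp)
  intro i h1 h2'
  simp only [List.getElem_set, List.getElem_map, List.getElem_range]
  by_cases hit : t = i
  · subst hit
    rw [if_pos rfl, if_pos (by omega)]
    have he : t = (t - 2) + 2 := by omega
    rw [he, Mz_eq]
    have e1 : t - 2 + 2 - 1 = t - 1 := by omega
    have e2 : t - 2 + 2 - 2 = t - 2 := by omega
    rw [e1, e2, show t - 2 + 1 = t - 1 from by omega]
  · rw [if_neg hit]
    by_cases hlt : i < t
    · rw [if_pos hlt, if_pos (by omega)]
    · rw [if_neg hlt, if_neg (by omega)]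

theorem minner (N t : Nat) (h2 : 2 ≤ t) (ht : t ≤ N + 1) :
    (PySem.List.pyRange (t : Int) ((N : Int) + 1) 1).foldl mstepf (mmid N t) = mmid N (N + 1) := by
  obtain ⟨d, hd⟩ : ∃ d, t + d = N + 1 := ⟨N + 1 - t, by omega⟩
  induction d generalizing t with
  | zero =>
    have h : t = N + 1 := by omega
    subst h
    rw [PySem.List.pyRange_one_eq_nil (by omega)]
    rfl
  | succ d ih =>
    rw [PySem.List.pyRange_one_cons (by omega), List.foldl_cons, mstep N t h2 (by omega)]
    have : (t : Int) + 1 = ((t + 1 : Nat) : Int) := by push_cast; ring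
    rw [this]
    exact ih (t + 1) (by omega) (by omega) (by omega)

theorem mfull (N : Nat) : mmid N (N + 1) = (List.range (N + 1)).map Mz := by
  unfold mmid
  apply List.map_congr_left
  intro j hj
  rw [if_pos (by simpa using List.mem_range.mp hj)]

theorem motzA (N : Nat) : motzkin_up_to (N : Int) = (List.range (N + 1)).map Mz := by
  simp only [motzkin_up_to]
  rw [if_neg (by omega)]
  have ht : ((N : Int) + 1).toNat = N + 1 := by omega
  rw [ht]
  rcases Nat.eq_zero_or_pos N with h0 | hpos
  · subst h0
    rw [if_neg (by omega), PySem.List.pyRange_one_eq_nil (by omega)]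
    show PySem.List.pySetD (List.replicate 1 (0:Int)) 0 1 = List.map Mz (List.range 1)
    rw [show List.range 1 = [0] from rfl, List.map_singleton, show Mz 0 = 1 from by rw [Mz]]
    rfl
  · rw [if_pos (by omega)]
    have hstart : PySem.List.pySetD (PySem.List.pySetD (List.replicate (N + 1) (0 : Int)) 0 1) 1 1
        = mmid N 2 := by
      rw [show (0:Int) = ((0:Nat):Int) from rfl, show (1:Int) = ((1:Nat):Int) from rfl,
        PySem.List.pySetD_natCast, PySem.List.pySetD_natCast]
      apply List.ext_getElem (by simp [mmid])
      intro i h1 h2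
      unfold mmid
      simp only [List.getElem_set, List.getElem_replicate, List.getElem_map, List.getElem_range]
      rcases i with _ | _ | m
      · simp [show Mz 0 = 1 from by rw [Mz]]
      · simp [show Mz 1 = 1 from by rw [Mz]]
      · simp
    rw [hstart]
    have h := minner N 2 le_rfl (by omega)
    rw [mfull] at h
    exact h

theorem rev_range (n : Nat) :
    (List.range n).reverse = (List.range n).map (fun i => n - 1 - i) := by
  rw [List.range_eq_range', List.reverse_range']
  simp [List.range_eq_range']

-- sum over l paired with its own reverse
theorem zip_rev_sum (f : Nat → Int) (s : Nat) :
    ((((List.range s).map f).zip ((List.range s).map f).reverse).map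
        (fun ab => ab.1 * ab.2)).sum
      = ((List.range s).map (fun k => f k * f (s - 1 - k))).sum := by
  rw [← List.map_reverse, rev_range, List.map_map, List.zip_map', List.map_map]
  rfl

def bstep (m : List Int) (n : Int) : List Int :=
  let pref := PySem.List.slice m none (some (n - 1))
  m ++ [PySem.List.pyGetD m (n - 1) 0 +
        ((pref.zip pref.reverse).map (fun ab => ab.1 * ab.2)).sum]

theorem bstep_eq (t : Nat) (h2 : 2 ≤ t) :
    bstep ((List.range t).map Mz) (t : Int) = (List.range (t + 1)).map Mz := by
  simp only [bstep]
  have hr : (t : Int) - 1 = ((t - 1 : Nat) : Int) := by omega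
  rw [hr, PySem.List.slice_to_natCast, PySem.List.pyGetD_natCast]
  rw [← List.map_take, List.take_range, Nat.min_eq_left (by omega)]
  rw [zip_rev_sum, PySem.List.getD_map_range _ _ _ _ (by omega)]
  rw [List.range_succ, List.map_append, List.map_singleton]
  have hfun : ∀ k ∈ List.range (t - 1), Mz k * Mz (t - 1 - 1 - k) = Mz k * Mz (t - 2 - k) := by
    intro k hk
    rw [show t - 1 - 1 - k = t - 2 - k from by omega]
  rw [List.map_congr_left hfun]
  have he : Mz t = Mz (t - 1) + ((List.range (t - 1)).map (fun k => Mz k * Mz (t - 2 - k))).sum := by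
    conv_lhs => rw [show t = (t - 2) + 2 from by omega]
    rw [Mz_eq, show t - 2 + 1 = t - 1 from by omega]
  rw [he]

theorem motzB (N : Nat) :
    (PySem.List.pyRange 2 ((N : Int) + 2) 1).foldl bstep [1, 1]
      = (List.range (N + 2)).map Mz := by
  suffices h : ∀ t : Nat, 2 ≤ t →
      (PySem.List.pyRange 2 (t : Int) 1).foldl bstep [1, 1] = (List.range t).map Mz by
    have := h (N + 2) (by omega)
    rwa [show ((N + 2 : Nat) : Int) = (N : Int) + 2 from by push_cast; ring] at this
  intro t h2
  induction t with
  | zero => omega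
  | succ s ih =>
    rcases Nat.lt_or_ge s 2 with hs | hs
    · have : s = 1 := by omega
      subst this
      rw [PySem.List.pyRange_one_eq_nil (by omega)]
      show ([1, 1] : List Int) = _
      show ([1, 1] : List Int) = [Mz 0, Mz 1]
      rw [show Mz 0 = 1 from by rw [Mz], show Mz 1 = 1 from by rw [Mz]]
    · rw [show ((s + 1 : Nat) : Int) = (s : Int) + 1 from by push_cast; ring,
        PySem.List.pyRange_one_succ_right (by omega), List.foldl_append, ih hs]
      show bstep ((List.range s).map Mz) (s : Int) = _
      exact bstep_eq s hs

def rowfun (N n : Nat) : List Int := (List.range (N + 1)).map (fun k => Pc n k)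

theorem Pc_pos_zero (t : Nat) (h : 1 ≤ t) : Pc t 0 = 0 := by
  rcases t with _ | m
  · omega
  · exact Pc_succ_zero m

theorem rinner (N t : Nat) (ht1 : 1 ≤ t) (s : Nat) (hs1 : 1 ≤ s) (hs2 : s ≤ N + 1) :
    (PySem.List.pyRange 1 (s : Int) 1).foldl (fun row k =>
        row ++ [PySem.List.pyGetD row (k - 1) 0 +
          (if k ≤ (t : Int) then
            PySem.List.pyGetD (PySem.List.pyGetD ((List.range t).map (rowfun N)) ((t : Int) - k) []) k 0
          else 0)]) [0]
      = (List.range s).map (fun k => Pc t k) := by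
  induction s with
  | zero => omega
  | succ s ih =>
    rcases Nat.lt_or_ge s 1 with hs | hs
    · have : s = 0 := by omega
      subst this
      rw [PySem.List.pyRange_one_eq_nil (by omega)]
      show ([0] : List Int) = _
      rw [show List.range 1 = [0] from rfl, List.map_singleton, Pc_pos_zero t ht1]
    · rw [show ((s + 1 : Nat) : Int) = (s : Int) + 1 from by push_cast; ring,
        PySem.List.pyRange_one_succ_right (by omega), List.foldl_append, ih hs (by omega)]
      simp only [List.foldl_cons, List.foldl_nil]
      have h1 : (s : Int) - 1 = ((s - 1 : Nat) : Int) := by omega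
      rw [h1, PySem.List.pyGetD_natCast, PySem.List.getD_map_range _ _ _ _ (by omega)]
      have hval : (if (s : Int) ≤ (t : Int) then
          PySem.List.pyGetD (PySem.List.pyGetD ((List.range t).map (rowfun N)) ((t : Int) - (s : Int)) []) (s : Int) 0
        else 0) = (if s ≤ t then Pc (t - s) s else 0) := by
        by_cases hst : s ≤ t
        · rw [if_pos (by exact_mod_cast hst), if_pos hst]
          have h2 : (t : Int) - (s : Int) = ((t - s : Nat) : Int) := by omega
          rw [show PySem.List.pyGetD ((List.range t).map (rowfun N)) ((t : Int) - (s : Int)) [] = rowfun N (t - s) from by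
            rw [h2, PySem.List.pyGetD_natCast, PySem.List.getD_map_range _ _ _ _ (by omega)]]
          unfold rowfun
          rw [PySem.List.pyGetD_natCast, PySem.List.getD_map_range _ _ _ _ (by omega)]
        · rw [if_neg (by exact_mod_cast hst), if_neg hst]
      rw [hval]
      rw [List.range_succ, List.map_append, List.map_singleton]
      congr 1
      rw [show Pc t s = Pc t ((s - 1) + 1) from by rw [Nat.sub_add_cancel hs], Pc_step,
        show s - 1 + 1 = s from Nat.sub_add_cancel hs]

theorem rinit (N : Nat) : List.replicate (N + 1) (1 : Int) = rowfun N 0 := by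
  unfold rowfun
  apply List.ext_getElem (by simp)
  intro i h1 h2
  simp [Pc_zero]

def rstepf (N : Nat) (rows : List (List Int)) (n : Int) : List (List Int) :=
  rows ++ [(PySem.List.pyRange 1 ((N : Int) + 1) 1).foldl (fun row k =>
    row ++ [PySem.List.pyGetD row (k - 1) 0 +
      (if k ≤ n then
        PySem.List.pyGetD (PySem.List.pyGetD rows (n - k) []) k 0
      else 0)]) [0]]

theorem routerB (N : Nat) :
    (PySem.List.pyRange 1 ((N : Int) + 1) 1).foldl (rstepf N)
      [List.replicate (N + 1) (1 : Int)]
      = (List.range (N + 1)).map (rowfun N) := by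
  suffices h : ∀ t : Nat, 1 ≤ t → t ≤ N + 1 →
      (PySem.List.pyRange 1 (t : Int) 1).foldl (rstepf N)
        [List.replicate (N + 1) (1 : Int)] = (List.range t).map (rowfun N) by
    have := h (N + 1) (by omega) le_rfl
    rwa [show ((N + 1 : Nat) : Int) = (N : Int) + 1 from by push_cast; ring] at this
  intro t ht1 ht2
  induction t with
  | zero => omega
  | succ t ih =>
    rcases Nat.lt_or_ge t 1 with hs | hs
    · have : t = 0 := by omega
      subst this
      rw [PySem.List.pyRange_one_eq_nil (by omega)]
      show [List.replicate (N + 1) (1 : Int)] = _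
      rw [show List.range 1 = [0] from rfl, List.map_singleton, rinit]
    · rw [show ((t + 1 : Nat) : Int) = (t : Int) + 1 from by push_cast; ring,
        PySem.List.pyRange_one_succ_right (by omega), List.foldl_append, ih hs (by omega)]
      simp only [List.foldl_cons, List.foldl_nil]
      unfold rstepf
      rw [show ((N : Int) + 1) = ((N + 1 : Nat) : Int) from by push_cast; ring,
        rinner N t hs (N + 1) (by omega) le_rfl]
      rw [show List.range (t + 1) = List.range t ++ [t] from List.range_succ,
        List.map_append, List.map_singleton]
      rfl

def convM (n : Nat) : Int := ((List.range n).map (fun k => Mz k * Mz (n - 1 - k))).sum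

theorem convM_eq (j : Nat) (h : 1 ≤ j) : convM j = Mz (j + 1) - Mz j := by
  have he : Mz (j + 1) = Mz j + convM j := by
    conv_lhs => rw [show j + 1 = (j - 1) + 2 from by omega]
    rw [Mz_eq, show j - 1 + 1 = j from by omega]
    rfl
  omega

theorem barA_getD (N j : Nat) (h1 : 1 ≤ j) (h2 : j ≤ N) :
    (virasoro_bar_cohom_gen_degree (N : Int)).getD (j : Int) 0 = convM j := by
  simp only [virasoro_bar_cohom_gen_degree]
  rw [motzA]
  have hitems := PySem.Dict.items_foldl_insert_fresh
    (l := PySem.List.pyRange 1 ((N : Int) + 1) 1)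
    (k := fun n => n)
    (v := fun n => ((PySem.List.pyRange 0 n 1).map (fun k =>
      PySem.List.pyGetD ((List.range (N + 1)).map Mz) k 0 *
      PySem.List.pyGetD ((List.range (N + 1)).map Mz) (n - 1 - k) 0)).sum)
    (d := PySem.Dict.empty)
    (fun a _ => PySem.Dict.contains_empty a)
    (by simpa using PySem.List.nodup_pyRange_one 1 ((N : Int) + 1))
  set cv : Int → Int := fun n => ((PySem.List.pyRange 0 n 1).map (fun k =>
      PySem.List.pyGetD ((List.range (N + 1)).map Mz) k 0 *
      PySem.List.pyGetD ((List.range (N + 1)).map Mz) (n - 1 - k) 0)).sum with hcv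
  set d := (PySem.List.pyRange 1 ((N : Int) + 1) 1).foldl
      (fun result n => result.insert n (cv n)) PySem.Dict.empty with hd
  have hitems' : d.items = (PySem.List.pyRange 1 ((N : Int) + 1) 1).map (fun n => (n, cv n)) := by
    rw [hd]
    simpa using hitems
  have hnod : d.keys.Nodup := by
    show (d.items.map (·.1)).Nodup
    rw [hitems', List.map_map]
    simpa [Function.comp_def] using PySem.List.nodup_pyRange_one 1 ((N : Int) + 1)
  have hmem : ((j : Int), cv (j : Int)) ∈ d.items := by
    rw [hitems']
    exact List.mem_map.mpr ⟨(j : Int), PySem.List.mem_pyRange_one.mpr ⟨by omega, by omega⟩, rfl⟩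
  rw [PySem.Dict.getD_of_mem_items d hmem hnod 0]
  rw [hcv]
  simp only
  rw [show ((j : Int)) = ((j : Nat) : Int) from rfl, PySem.List.pyRange_zero_nat, List.map_map]
  unfold convM
  congr 1
  apply List.map_congr_left
  intro k hk
  have hk' : k < j := List.mem_range.mp hk
  simp only [Function.comp]
  have hc : ((j : Nat) : Int) - 1 - (k : Int) = ((j - 1 - k : Nat) : Int) := by omega
  rw [hc, PySem.List.pyGetD_natCast, PySem.List.pyGetD_natCast,
    PySem.List.getD_map_range _ _ _ _ (by omega), PySem.List.getD_map_range _ _ _ _ (by omega)]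

theorem motzB' (N : Nat) :
    (PySem.List.pyRange 2 ((N : Int) + 2) 1).foldl (fun m n =>
      m ++ [PySem.List.pyGetD m (n - 1) 0 +
        (((PySem.List.slice m none (some (n - 1))).zip
            (PySem.List.slice m none (some (n - 1))).reverse).map
          (fun ab => ab.1 * ab.2)).sum]) [1, 1]
      = (List.range (N + 2)).map Mz :=
  motzB N

theorem routerB' (N : Nat) :
    (PySem.List.pyRange 1 ((N : Int) + 1) 1).foldl (fun rows n =>
        rows ++ [(PySem.List.pyRange 1 ((N : Int) + 1) 1).foldl (fun row k =>
          row ++ [PySem.List.pyGetD row (k - 1) 0 +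
            (if k ≤ n then
              PySem.List.pyGetD (PySem.List.pyGetD rows (n - k) []) k 0
            else 0)]) [0]])
      [List.replicate (N + 1) (1 : Int)]
      = (List.range (N + 1)).map (rowfun N) :=
  routerB N

theorem mainN (N : Nat) :
    virasoro_pbw_bar_motzkin_table (N : Int) = virasoro_pbw_bar_motzkin_table_alt (N : Int) := by
  simp only [virasoro_pbw_bar_motzkin_table, virasoro_pbw_bar_motzkin_table_alt]
  rw [partA, motzA]
  rw [show ((N : Int) + 1).toNat = N + 1 from by omega]
  rw [motzB', routerB']
  rw [PySem.List.foldl_append_singleton_eq_map, List.nil_append]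
  apply List.map_congr_left
  intro n hn
  rw [PySem.List.mem_pyRange_one] at hn
  obtain ⟨hn1, hn2⟩ := hn
  have hj : n = ((n.toNat : Nat) : Int) := by omega
  set j := n.toNat with hjdef
  have hj1 : 1 ≤ j := by omega
  have hj2 : j ≤ N := by omega
  rw [hj]
  have hm1 : (((j : Nat) : Int)) - 1 = ((j - 1 : Nat) : Int) := by omega
  have hp1 : (((j : Nat) : Int)) + 1 = ((j + 1 : Nat) : Int) := by omega
  rw [hm1, hp1]
  simp only [PySem.List.pyGetD_natCast]
  rw [PySem.List.getD_map_range (fun j => Pc j N) _ _ _ (show j < N + 1 by omega),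
    PySem.List.getD_map_range Mz (N + 1) j _ (show j < N + 1 by omega),
    PySem.List.getD_map_range Mz (N + 1) (j - 1) _ (show j - 1 < N + 1 by omega),
    PySem.List.getD_map_range (rowfun N) _ _ _ (show j < N + 1 by omega),
    PySem.List.getD_map_range Mz (N + 2) (j + 1) _ (show j + 1 < N + 2 by omega),
    PySem.List.getD_map_range Mz (N + 2) j _ (show j < N + 2 by omega),
    PySem.List.getD_map_range Mz (N + 2) (j - 1) _ (show j - 1 < N + 2 by omega)]
  unfold rowfun
  rw [PySem.List.getD_map_range _ _ _ _ (show j < N + 1 by omega)]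
  rw [barA_getD N j hj1 hj2, convM_eq j hj1]
  rw [if_pos (show ((j : Nat) : Int) ≥ 1 by omega)]
  rw [Pc_stab j N hj2]

-- ===== VERDICT (by name: the statement is the Claim_ definition above) =====

theorem virasoro_pbw_bar_motzkin_table_spec : Claim_equal_virasoro_pbw_bar_motzkin_table := by
  intro n_max hDom hPre
  unfold Spec_virasoro_pbw_bar_motzkin_table
  unfold Pre_virasoro_pbw_bar_motzkin_table at hPre
  rw [show n_max = ((n_max.toNat : Nat) : Int) from by omega]
  exact mainN n_max.toNat

theorem virasoro_pbw_bar_motzkin_table_raises : Claim_raises_virasoro_pbw_bar_motzkin_table := by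
  unfold Claim_raises_virasoro_pbw_bar_motzkin_table
  refine ⟨fun n _ h => ?_, by decide⟩
  unfold Pre_virasoro_pbw_bar_motzkin_table
  unfold Raises_virasoro_pbw_bar_motzkin_table at h
  omega

-- self-check: the crash-fix witness really lies outside Pre_ (via the raises claim)
theorem pvRaiseWitness_ok :
    ¬ Pre_virasoro_pbw_bar_motzkin_table pvRaiseWitness_virasoro_pbw_bar_motzkin_table :=
  virasoro_pbw_bar_motzkin_table_raises.1 _ (by decide) (by decide)
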